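-- pv_equiv track=rewrite | github.com/1Chloe1/FirstRepository | SESSION/MYCODE/mycode@20250621.py | llis
-- ===== SOURCE A (Python) =====
-- def hd(xs):
--     return xs[0]
--
-- def tl(xs):
--     return xs[1:]
--
-- def llis(xs):
--     if len(xs) <= 1:
--         return xs
--     else:
--         res = llis(tl(xs))
--         if len(res)==len(tl(xs)):
--             if hd(xs)<=hd(tl(xs)):
--                 return xs
--             else:
--                 return res
--         else:
--             return res
--
-- xs = [1, 2]
-- ===== SOURCE B (Python) =====
-- def llis(xs):
--     # Longest non-decreasing suffix: one backward scan to find its start, then slice.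
--     if not xs:
--         return []
--     i = len(xs) - 1
--     while i > 0 and xs[i - 1] <= xs[i]:
--         i -= 1
--     return xs[i:]
-- ===== Notes on version B (the rewrite author's own statement) =====
-- stated objective: faster
-- what changed: replaced A's recursion with O(n) recursive calls each slicing and comparing lengths by a single backward scan that finds the start index of the longest non-decreasing suffix and returns one slice
import Mathlib
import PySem

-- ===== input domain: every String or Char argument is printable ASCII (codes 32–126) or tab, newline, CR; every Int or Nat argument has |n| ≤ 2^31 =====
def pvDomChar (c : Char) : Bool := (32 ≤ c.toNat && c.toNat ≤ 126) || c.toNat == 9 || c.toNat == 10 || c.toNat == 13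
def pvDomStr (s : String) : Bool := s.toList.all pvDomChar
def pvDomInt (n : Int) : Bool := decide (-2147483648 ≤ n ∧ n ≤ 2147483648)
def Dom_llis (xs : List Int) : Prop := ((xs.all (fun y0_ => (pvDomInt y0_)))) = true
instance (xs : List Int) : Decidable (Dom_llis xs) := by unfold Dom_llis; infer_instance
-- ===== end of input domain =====

-- B replaces A's O(n^2) recursion (one slice + length comparison per level) by a single
-- backward scan finding the start of the longest non-decreasing suffix; asymptotically faster.

-- ===== PORT A =====
-- len(xs) <= 1 → return xs; else recurse on tl(xs) = xs[1:], compare lengths, compare heads.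
def llis (xs : List Int) : List Int :=
  match xs with
  | [] => []
  | [x] => [x]
  | x :: y :: rest =>
      let res := llis (y :: rest)
      if res.length = (y :: rest).length then
        if x ≤ y then x :: y :: rest else res
      else res

-- ===== PORT B =====
-- the while loop 'while i > 0 and xs[i-1] <= xs[i]: i -= 1', started at i = len-1;
-- indices are always in range in B, so getD with default 0 is exact.
def bScan (xs : List Int) : Nat → Nat
  | 0 => 0
  | i + 1 => if xs.getD i 0 ≤ xs.getD (i + 1) 0 then bScan xs i else i + 1

-- xs[i:] with 0 ≤ i is List.drop i
def llis_alt (xs : List Int) : List Int :=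
  if xs = [] then [] else xs.drop (bScan xs (xs.length - 1))

-- ===== PRECONDITION & SPEC =====
def Spec_llis (xs : List Int) (out : List Int) : Prop := out = llis_alt xs
instance (xs : List Int) (out : List Int) : Decidable (Spec_llis xs out) := by unfold Spec_llis; infer_instance

-- ===== CLAIM (what is proved, stated in full; the proofs are below) =====
def Claim_equal_llis : Prop := ∀ (xs : List Int), Dom_llis xs → Spec_llis xs (llis xs)

-- ===== LEMMAS AND PROOFS =====

theorem bScan_le (xs : List Int) (i : Nat) : bScan xs i ≤ i := by
  induction i with
  | zero => simp [bScan]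
  | succ i ih => simp only [bScan]; split <;> omega

theorem bScan_cons (x : Int) (ys : List Int) (i : Nat) :
    bScan (x :: ys) (i + 1) =
      if bScan ys i = 0 then (if x ≤ ys.getD 0 0 then 0 else 1) else bScan ys i + 1 := by
  induction i with
  | zero => simp [bScan]
  | succ i ih =>
      have el : bScan (x :: ys) (i + 2) =
          if ys.getD i 0 ≤ ys.getD (i + 1) 0 then bScan (x :: ys) (i + 1) else i + 2 := rfl
      have er : bScan ys (i + 1) =
          if ys.getD i 0 ≤ ys.getD (i + 1) 0 then bScan ys i else i + 1 := rfl
      rw [el, er]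
      by_cases hc : ys.getD i 0 ≤ ys.getD (i + 1) 0
      · rw [if_pos hc, if_pos hc, ih]
      · rw [if_neg hc, if_neg hc]
        simp

theorem llis_eq_alt (xs : List Int) : llis xs = llis_alt xs := by
  induction xs with
  | nil => simp [llis, llis_alt]
  | cons x ys ih =>
      match ys, ih with
      | [], _ => simp [llis, llis_alt, bScan]
      | y :: rest, ih =>
          have hk : bScan (y :: rest) rest.length ≤ rest.length := bScan_le _ _
          have halt_ys : llis_alt (y :: rest) =
              (y :: rest).drop (bScan (y :: rest) rest.length) := by
            simp [llis_alt]
          have hcons : bScan (x :: y :: rest) (rest.length + 1) =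
              if bScan (y :: rest) rest.length = 0 then (if x ≤ y then 0 else 1)
              else bScan (y :: rest) rest.length + 1 := bScan_cons x (y :: rest) rest.length
          have halt_cons : llis_alt (x :: y :: rest) =
              (x :: y :: rest).drop (bScan (x :: y :: rest) (rest.length + 1)) := by
            simp [llis_alt]
          have hl : llis (x :: y :: rest) =
              if (llis (y :: rest)).length = (y :: rest).length then
                (if x ≤ y then x :: y :: rest else llis (y :: rest))
              else llis (y :: rest) := rfl
          by_cases h0 : bScan (y :: rest) rest.length = 0
          · have hres : llis (y :: rest) = y :: rest := by rw [ih, halt_ys, h0]; rfl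
            rw [halt_cons, hcons, if_pos h0, hl, hres]
            by_cases hxy : x ≤ y
            · rw [if_pos rfl, if_pos hxy, if_pos hxy]; rfl
            · rw [if_pos rfl, if_neg hxy, if_neg hxy]; rfl
          · have hlne : (llis (y :: rest)).length ≠ (y :: rest).length := by
              rw [ih, halt_ys]
              simp only [List.length_drop, List.length_cons]
              omega
            rw [hl, if_neg hlne, ih, halt_cons, hcons, if_neg h0, halt_ys]
            rfl

-- ===== VERDICT (by name: the statement is the Claim_ definition above) =====
theorem llis_spec : Claim_equal_llis := by
  intro xs _
  unfold Spec_llis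
  exact llis_eq_alt xs
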